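-- pv_equiv track=rewrite | github.com/enthought/traitsui | traitsui/helper.py | user_name_for
-- ===== SOURCE A (Python) =====
-- def user_name_for(name):
--     """ Returns a "user-friendly" name for a specified trait.
--     """
--     name = name.replace('_', ' ')
--     name = name[:1].upper() + name[1:]
--     result = ''
--     last_lower = 0
--     for c in name:
--         if c.isupper() and last_lower:
--             result += ' '
--         last_lower = c.islower()
--         result += c
--     return result
-- ===== SOURCE B (Python) =====
-- def user_name_for(name):
--     """ Returns a "user-friendly" name for a specified trait.
--     """
--     name = name.replace('_', ' ')
--     name = name[:1].upper() + name[1:]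
--     return ' '.join(_words(name))
--
--
-- def _words(s):
--     """Tokenize s into maximal chunks, cutting before each uppercase letter
--     that follows a lowercase one, then the caller joins them with spaces."""
--     if not s:
--         return []
--     i = 1
--     while i < len(s) and not (s[i].isupper() and s[i - 1].islower()):
--         i += 1
--     return [s[:i]] + _words(s[i:])
-- ===== Notes on version B (the rewrite author's own statement) =====
-- stated objective: alternative
-- what changed: Replaces A's single character-accumulating loop with a last_lower flag by a recursive tokenizer that splits the string into maximal words (scanning to the next lowercase-uppercase boundary for each word) and then joins the word list with single spaces.
import Mathlib
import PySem

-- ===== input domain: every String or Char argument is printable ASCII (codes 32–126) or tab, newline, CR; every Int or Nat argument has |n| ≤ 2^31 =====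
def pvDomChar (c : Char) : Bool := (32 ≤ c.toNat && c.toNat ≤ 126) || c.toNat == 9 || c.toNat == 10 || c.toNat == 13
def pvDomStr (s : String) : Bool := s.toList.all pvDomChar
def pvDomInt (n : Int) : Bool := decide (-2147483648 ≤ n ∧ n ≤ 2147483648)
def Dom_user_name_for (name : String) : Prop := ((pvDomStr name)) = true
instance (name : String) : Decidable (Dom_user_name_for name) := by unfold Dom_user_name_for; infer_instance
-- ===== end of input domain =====

-- B replaces A's single stateful accumulation loop by a recursive tokenizer that cuts the
-- string into maximal words (cutting before an uppercase letter that follows a lowercase one)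
-- and then joins the words with spaces (alternative decomposition, same cost).

-- ===== PORT A =====
def user_name_for (name : String) : String :=
  let n1 := PySem.Chars.replace name.toList ['_'] [' ']
  let n2 := PySem.Chars.upper (PySem.Chars.slice n1 none (some 1)) ++ PySem.Chars.slice n1 (some 1) none
  String.ofList ((n2.foldl
      (fun (st : List Char × Bool) c =>
        (st.1 ++ (if PySem.Chars.isupper c && st.2 then [' '] else []) ++ [c], PySem.Chars.islower c))
      (([] : List Char), false)).1)

-- ===== PORT B =====
-- port of the while loop in _words: first index ≥ i with a word boundary (or len(s)).
-- Indexing is exact: the loop only reads s[j] and s[j-1] with 1 ≤ j < len(s), both in range.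
def pvWordEnd (s : List Char) (i : Nat) : Nat :=
  if _h : i < s.length then
    if PySem.Chars.isupper (s.getD i ' ') && PySem.Chars.islower (s.getD (i - 1) ' ') then i
    else pvWordEnd s (i + 1)
  else i
termination_by s.length - i

theorem pvWordEnd_ge (s : List Char) (i : Nat) : i ≤ pvWordEnd s i := by
  fun_induction pvWordEnd s i <;> omega

-- port of _words: s[:i] is take i and s[i:] is drop i (i ≥ 0, so the slices are exact)
def pvWords (s : List Char) : List (List Char) :=
  if _h : s = [] then [] else
    let i := pvWordEnd s 1
    s.take i :: pvWords (s.drop i)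
termination_by s.length
decreasing_by
  have h1 := pvWordEnd_ge s 1
  have h2 : s.length ≠ 0 := by simpa using _h
  simp only [List.length_drop]; omega

def user_name_for_alt (name : String) : String :=
  let n1 := PySem.Chars.replace name.toList ['_'] [' ']
  let n2 := PySem.Chars.upper (PySem.Chars.slice n1 none (some 1)) ++ PySem.Chars.slice n1 (some 1) none
  String.ofList (PySem.Chars.join [' '] (pvWords n2))

-- ===== PRECONDITION & SPEC =====
def Spec_user_name_for (name : String) (out : String) : Prop := out = user_name_for_alt name
instance (name : String) (out : String) : Decidable (Spec_user_name_for name out) := by unfold Spec_user_name_for; infer_instance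

-- ===== CLAIM (what is proved, stated in full; the proofs are below) =====
def Claim_equal_user_name_for : Prop := ∀ (name : String), Dom_user_name_for name → Spec_user_name_for name (user_name_for name)

-- ===== LEMMAS AND PROOFS =====

/-- A's loop written as structural recursion on the remaining characters with the flag. -/
def gA : List Char → Bool → List Char
  | [], _ => []
  | c :: cs, b => (if PySem.Chars.isupper c && b then [' '] else []) ++ c :: gA cs (PySem.Chars.islower c)

theorem foldA_eq_gA (cs : List Char) (acc : List Char) (b : Bool) :
    (cs.foldl
      (fun (st : List Char × Bool) c =>
        (st.1 ++ (if PySem.Chars.isupper c && st.2 then [' '] else []) ++ [c], PySem.Chars.islower c))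
      (acc, b)).1 = acc ++ gA cs b := by
  induction cs generalizing acc b with
  | nil => simp [gA]
  | cons c cs ih => rw [List.foldl_cons, ih]; simp [gA]

theorem pvWordEnd_le (s : List Char) (i : Nat) (h : i ≤ s.length) : pvWordEnd s i ≤ s.length := by
  fun_induction pvWordEnd s i <;> omega

theorem pvWordEnd_boundary (s : List Char) (i : Nat) (h : pvWordEnd s i < s.length) :
    (PySem.Chars.isupper (s.getD (pvWordEnd s i) ' ') &&
      PySem.Chars.islower (s.getD (pvWordEnd s i - 1) ' ')) = true := by
  fun_induction pvWordEnd s i with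
  | case1 i hlt hcond => exact hcond
  | case2 i hlt hcond ih => exact ih h
  | case3 i hge => omega

/-- The while-scan: A's flag loop inserts no space strictly before the word end. -/
theorem gA_scan (t : List Char) (i : Nat) (h1 : 1 ≤ i) (h2 : i ≤ t.length) :
    gA (t.drop i) (PySem.Chars.islower (t.getD (i - 1) ' ')) =
      (t.drop i).take (pvWordEnd t i - i) ++
        gA (t.drop (pvWordEnd t i)) (PySem.Chars.islower (t.getD (pvWordEnd t i - 1) ' ')) := by
  fun_induction pvWordEnd t i with
  | case1 i hlt hcond => simp
  | case2 i hlt hcond ih =>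
      have hdrop : t.drop i = t.getD i ' ' :: t.drop (i + 1) := by
        rw [List.getD_eq_getElem t ' ' hlt]; exact List.drop_eq_getElem_cons hlt
      have hge := pvWordEnd_ge t (i + 1)
      rw [hdrop]
      simp only [gA]
      rw [if_neg hcond]
      rw [show PySem.Chars.islower (t.getD i ' ') = PySem.Chars.islower (t.getD (i + 1 - 1) ' ') by
        norm_num]
      rw [ih (by omega) (by omega)]
      rw [show pvWordEnd t (i + 1) - i = (pvWordEnd t (i + 1) - (i + 1)) + 1 by omega,
        List.take_succ_cons]
      simp
  | case3 i hge => simp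

theorem pvWords_ne_nil (t : List Char) (h : t ≠ []) : pvWords t ≠ [] := by
  rw [pvWords]; simp [h]

/-- Main invariant: A's flag loop = join of B's words. -/
theorem gA_words (t : List Char) : gA t false = PySem.Chars.join [' '] (pvWords t) := by
  fun_induction pvWords t with
  | case1 => simp_all [gA, PySem.Chars.join_nil]
  | case2 s hs i ih =>
      have hi : i = pvWordEnd s 1 := rfl
      obtain ⟨c, rest, hts⟩ := List.exists_cons_of_ne_nil hs
      have hlen : 1 ≤ s.length := by rw [hts]; simp
      have hele : i ≤ s.length := by rw [hi]; exact pvWordEnd_le s 1 hlen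
      have hege : 1 ≤ i := by rw [hi]; exact pvWordEnd_ge s 1
      have h0 : gA s false = c :: gA (s.drop 1) (PySem.Chars.islower (s.getD 0 ' ')) := by
        rw [hts]; simp [gA]
      have hstep : gA s false = s.take i ++
          gA (s.drop i) (PySem.Chars.islower (s.getD (i - 1) ' ')) := by
        rw [h0, show (0 : Nat) = 1 - 1 from rfl, gA_scan s 1 le_rfl hlen, ← hi]
        rw [show s.take i = c :: (s.drop 1).take (i - 1) by
          rw [hts, show i = (i - 1) + 1 by omega]; rfl]
        simp
      by_cases hend : i = s.length
      · have hnil : pvWords ([] : List Char) = [] := by rw [pvWords]; simp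
        rw [hstep, hend]
        simp [List.drop_length, gA, hnil, PySem.Chars.join_singleton]
      · have helt : i < s.length := lt_of_le_of_ne hele hend
        have hb : (PySem.Chars.isupper (s.getD i ' ') &&
            PySem.Chars.islower (s.getD (i - 1) ' ')) = true := by
          rw [hi]; exact pvWordEnd_boundary s 1 (by rw [← hi]; exact helt)
        rw [Bool.and_eq_true] at hb
        have hdropE : s.drop i = s.getD i ' ' :: s.drop (i + 1) := by
          rw [List.getD_eq_getElem s ' ' helt]; exact List.drop_eq_getElem_cons helt
        have hX : gA (s.drop i) (PySem.Chars.islower (s.getD (i - 1) ' '))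
            = ' ' :: gA (s.drop i) false := by
          rw [hdropE]
          simp only [gA]
          rw [hb.1, hb.2]
          simp
        rw [hstep, hX, ih]
        have hdne : s.drop i ≠ [] := by
          intro hc
          have := congrArg List.length hc
          simp at this
          omega
        obtain ⟨w, ws, hw⟩ := List.exists_cons_of_ne_nil (pvWords_ne_nil (s.drop i) hdne)
        rw [hw, PySem.Chars.join_cons_cons]
        simp

-- ===== VERDICT (by name: the statement is the Claim_ definition above) =====
theorem user_name_for_spec : Claim_equal_user_name_for := by
  intro name _
  unfold Spec_user_name_for user_name_for user_name_for_alt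
  simp only [foldA_eq_gA, List.nil_append, gA_words]
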